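-- pv_equiv track=rewrite | github.com/john-occasionally-blogs/FITREPextractor | Cleanup/fitrep_extractor25.py | check_not_observed
-- ===== SOURCE A (Python) =====
-- def check_not_observed(img, text):
--     """Check if Not Observed checkbox is marked"""
--     if 'Not Observed' in text:
--         lines = text.split('\n')
--         for i, line in enumerate(lines):
--             if 'Not Observed' in line:
--                 check_lines = lines[i:i+3]
--                 for check_line in check_lines:
--                     if 'X' in check_line and 'Extended' not in check_line:
--                         if len(check_line) < 50:
--                             return True
--     return False
-- ===== SOURCE B (Python) =====
-- def check_not_observed(img, text):
--     """Check if Not Observed checkbox is marked (single stateful pass)"""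
--     countdown = 0
--     for line in text.split('\n'):
--         if 'Not Observed' in line:
--             countdown = 3
--         if countdown > 0:
--             if 'X' in line and 'Extended' not in line and len(line) < 50:
--                 return True
--             countdown -= 1
--     return False
-- ===== Notes on version B (the rewrite author's own statement) =====
-- stated objective: simpler
-- what changed: Replaced the nested find-then-window scan (outer enumerate over lines, inner rescan of lines[i:i+3]) and the redundant whole-text 'Not Observed' guard with a single stateful pass over the lines maintaining a 3-line countdown that is set on each 'Not Observed' line and decremented while positive.
import Mathlib
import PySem

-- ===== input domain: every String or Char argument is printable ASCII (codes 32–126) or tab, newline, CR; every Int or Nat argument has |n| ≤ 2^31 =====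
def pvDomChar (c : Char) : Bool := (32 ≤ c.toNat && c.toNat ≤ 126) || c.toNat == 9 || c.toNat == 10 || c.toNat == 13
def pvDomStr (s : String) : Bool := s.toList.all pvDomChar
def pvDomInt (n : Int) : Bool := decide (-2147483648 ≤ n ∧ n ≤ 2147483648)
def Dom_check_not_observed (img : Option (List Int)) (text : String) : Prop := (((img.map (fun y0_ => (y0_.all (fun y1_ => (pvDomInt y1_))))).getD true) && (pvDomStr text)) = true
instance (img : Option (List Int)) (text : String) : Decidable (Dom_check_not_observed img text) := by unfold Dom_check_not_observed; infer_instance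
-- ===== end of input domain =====

-- B replaces A's nested find-then-window scan (and its redundant whole-text guard) by one
-- stateful pass over the lines with a 3-line countdown; same return value, simpler structure.

-- ===== PORT A =====
-- literal transliteration of A: whole-text guard, then for each line containing
-- 'Not Observed' scan the window lines[i:i+3] for a short 'X' line without 'Extended'.
def check_not_observed (img : Option (List Int)) (text : String) : Bool :=
  if PySem.Chars.isIn "Not Observed".toList text.toList then
    let lines := PySem.Chars.splitOn text.toList "\n".toList
    (PySem.List.enumerate lines 0).any (fun p =>
      if PySem.Chars.isIn "Not Observed".toList p.2 then
        (PySem.List.slice lines (some p.1) (some (p.1 + 3))).any (fun cl =>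
          PySem.Chars.isIn ['X'] cl && !PySem.Chars.isIn "Extended".toList cl
            && decide (PySem.Chars.len cl < 50))
      else false)
  else false

-- ===== PORT B =====
-- single pass: countdown set to 3 on a 'Not Observed' line, decremented while positive
def pvAltLoop : List (List Char) → Nat → Bool
  | [], _ => false
  | line :: rest, cd =>
    let cd' := if PySem.Chars.isIn "Not Observed".toList line then 3 else cd
    if 0 < cd' then
      if PySem.Chars.isIn ['X'] line && !PySem.Chars.isIn "Extended".toList line
          && decide (PySem.Chars.len line < 50) then true
      else pvAltLoop rest (cd' - 1)
    else pvAltLoop rest cd'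

def check_not_observed_alt (img : Option (List Int)) (text : String) : Bool :=
  pvAltLoop (PySem.Chars.splitOn text.toList "\n".toList) 0

-- ===== PRECONDITION & SPEC =====
def Spec_check_not_observed (img : Option (List Int)) (text : String) (out : Bool) : Prop := out = check_not_observed_alt img text
instance (img : Option (List Int)) (text : String) (out : Bool) : Decidable (Spec_check_not_observed img text out) := by unfold Spec_check_not_observed; infer_instance

-- ===== CLAIM (what is proved, stated in full; the proofs are below) =====
def Claim_equal_check_not_observed : Prop := ∀ (img : Option (List Int)) (text : String), Dom_check_not_observed img text → Spec_check_not_observed img text (check_not_observed img text)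

-- ===== LEMMAS AND PROOFS =====

def pvNo (l : List Char) : Bool := PySem.Chars.isIn "Not Observed".toList l
def pvHit (l : List Char) : Bool :=
  PySem.Chars.isIn ['X'] l && !PySem.Chars.isIn "Extended".toList l
    && decide (PySem.Chars.len l < 50)

-- shared truth condition: some line j is a hit and is covered (by the initial budget cd
-- or by a 'Not Observed' line at most two lines above it)
def pvSpec (ls : List (List Char)) (cd : Nat) : Prop :=
  ∃ j, j < ls.length ∧ pvHit (ls.getD j []) = true ∧
    (j < cd ∨ ∃ i, i ≤ j ∧ j < i + 3 ∧ pvNo (ls.getD i []) = true)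

-- every piece produced by splitOn.go is an infix of the original string
theorem pv_go_infix (sep s : List Char) : ∀ (fuel : Nat) (l cur : List Char)
    (acc : List (List Char)), (∀ p ∈ acc, p <:+: s) → (cur.reverse ++ l) <:+: s →
    ∀ p ∈ PySem.Chars.splitOn.go sep fuel l cur acc, p <:+: s := by
  intro fuel
  induction fuel with
  | zero =>
    intro l cur acc hacc h p hp
    rw [PySem.Chars.splitOn.go.eq_def] at hp
    simp only [List.mem_reverse, List.mem_cons] at hp
    rcases hp with rfl | hp
    · exact h
    · exact hacc p hp
  | succ f ih =>
    intro l cur acc hacc h p hp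
    cases l with
    | nil =>
      rw [PySem.Chars.splitOn.go.eq_def] at hp
      simp only [List.mem_reverse, List.mem_cons] at hp
      rcases hp with rfl | hp
      · exact List.IsInfix.trans (by simp) h
      · exact hacc p hp
    | cons c rest =>
      rw [PySem.Chars.splitOn.go.eq_def] at hp
      simp only at hp
      split at hp
      · refine ih _ [] _ ?_ ?_ p hp
        · intro q hq
          rcases List.mem_cons.mp hq with rfl | hq
          · exact ((List.prefix_append cur.reverse (c :: rest)).isInfix).trans h
          · exact hacc q hq
        · have h1 : List.drop sep.length (c :: rest) <:+: (c :: rest) :=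
            (List.drop_suffix sep.length (c :: rest)).isInfix
          have h2 : (c :: rest) <:+: cur.reverse ++ (c :: rest) :=
            (List.suffix_append cur.reverse (c :: rest)).isInfix
          simpa using (h1.trans (h2.trans h))
      · refine ih rest (c :: cur) acc hacc ?_ p hp
        have e : (c :: cur).reverse ++ rest = cur.reverse ++ (c :: rest) := by simp
        rw [e]; exact h

theorem pv_splitOn_piece_infix (s sep : List Char) :
    ∀ p ∈ PySem.Chars.splitOn s sep, p <:+: s := by
  intro p hp
  exact pv_go_infix sep s (s.length + 1) s [] [] (by simp) (by simp) p hp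

-- index-shift step for pvSpec when line 0 cannot fire
theorem pv_spec_shift (line : List Char) (rest : List (List Char)) (cd : Nat)
    (hcd : cd ≤ 3)
    (h0 : ¬(pvHit line = true ∧ (pvNo line = true ∨ 0 < cd))) :
    pvSpec (line :: rest) cd ↔ pvSpec rest ((if pvNo line = true then 3 else cd) - 1) := by
  have shift : ∀ cd2 : Nat,
      ((if pvNo line = true then 3 else cd) - 1) = cd2 →
      (pvSpec (line :: rest) cd ↔ pvSpec rest cd2) := by
    intro cd2 hcd2
    constructor
    · rintro ⟨j, hj, hhit, hcond⟩
      match j with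
      | 0 =>
        exfalso
        apply h0
        refine ⟨by simpa using hhit, ?_⟩
        rcases hcond with h | ⟨i, hi, _, hno⟩
        · exact Or.inr h
        · have : i = 0 := by omega
          subst this
          exact Or.inl (by simpa using hno)
      | j + 1 =>
        refine ⟨j, by simpa using hj, by simpa using hhit, ?_⟩
        by_cases hno : pvNo line = true
        · rw [if_pos hno] at hcd2
          rcases hcond with h | ⟨i, hi, hji, hnoi⟩
          · exact Or.inl (by omega)
          · match i with
            | 0 => exact Or.inl (by omega)
            | i + 1 => exact Or.inr ⟨i, by omega, by omega, by simpa using hnoi⟩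
        · rw [if_neg hno] at hcd2
          rcases hcond with h | ⟨i, hi, hji, hnoi⟩
          · exact Or.inl (by omega)
          · match i with
            | 0 => exact absurd (by simpa using hnoi) hno
            | i + 1 => exact Or.inr ⟨i, by omega, by omega, by simpa using hnoi⟩
    · rintro ⟨j, hj, hhit, hcond⟩
      refine ⟨j + 1, by simpa using hj, by simpa using hhit, ?_⟩
      by_cases hno : pvNo line = true
      · rw [if_pos hno] at hcd2
        rcases hcond with h | ⟨i, hi, hji, hnoi⟩
        · exact Or.inr ⟨0, by omega, by omega, by simpa using hno⟩
        · exact Or.inr ⟨i + 1, by omega, by omega, by simpa using hnoi⟩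
      · rw [if_neg hno] at hcd2
        rcases hcond with h | ⟨i, hi, hji, hnoi⟩
        · exact Or.inl (by omega)
        · exact Or.inr ⟨i + 1, by omega, by omega, by simpa using hnoi⟩
  exact shift _ rfl

-- the countdown loop decides pvSpec
theorem pv_alt_loop_iff (ls : List (List Char)) : ∀ cd : Nat, cd ≤ 3 →
    (pvAltLoop ls cd = true ↔ pvSpec ls cd) := by
  induction ls with
  | nil =>
    intro cd _
    simp [pvAltLoop, pvSpec]
  | cons line rest ih =>
    intro cd hcd
    by_cases hno : pvNo line = true
    · by_cases hhit : pvHit line = true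
      · simp only [pvAltLoop,
          show PySem.Chars.isIn "Not Observed".toList line = true from hno,
          show (PySem.Chars.isIn ['X'] line && !PySem.Chars.isIn "Extended".toList line
            && decide (PySem.Chars.len line < 50)) = true from hhit]
        norm_num
        exact ⟨0, by simp, by simpa using hhit, Or.inr ⟨0, le_refl 0, by omega, hno⟩⟩
      · simp only [pvAltLoop,
          show PySem.Chars.isIn "Not Observed".toList line = true from hno,
          show (PySem.Chars.isIn ['X'] line && !PySem.Chars.isIn "Extended".toList line
            && decide (PySem.Chars.len line < 50)) = false from
              Bool.eq_false_iff.mpr hhit]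
        norm_num
        rw [ih 2 (by omega), pv_spec_shift line rest cd hcd (fun h => hhit h.1),
          if_pos hno]
    · have hno' : PySem.Chars.isIn "Not Observed".toList line = false :=
        Bool.eq_false_iff.mpr hno
      match cd with
      | 0 =>
        simp only [pvAltLoop, hno']
        norm_num
        rw [ih 0 (by omega),
          pv_spec_shift line rest 0 (by omega) (fun h => by
            rcases h.2 with h2 | h2
            · exact hno h2
            · omega),
          if_neg hno]
      | cd + 1 =>
        by_cases hhit : pvHit line = true
        · simp only [pvAltLoop, hno',
            show (PySem.Chars.isIn ['X'] line && !PySem.Chars.isIn "Extended".toList line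
              && decide (PySem.Chars.len line < 50)) = true from hhit]
          norm_num
          exact ⟨0, by simp, by simpa using hhit, Or.inl (Nat.succ_pos cd)⟩
        · simp only [pvAltLoop, hno',
            show (PySem.Chars.isIn ['X'] line && !PySem.Chars.isIn "Extended".toList line
              && decide (PySem.Chars.len line < 50)) = false from
                Bool.eq_false_iff.mpr hhit]
          norm_num
          rw [ih cd (by omega), pv_spec_shift line rest (cd + 1) hcd (fun h => hhit h.1),
            if_neg hno]
          norm_num

-- A's nested scan decides pvSpec with budget 0
theorem pv_a_inner_iff (lines : List (List Char)) :
    ((PySem.List.enumerate lines 0).any (fun p =>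
      if PySem.Chars.isIn "Not Observed".toList p.2 then
        (PySem.List.slice lines (some p.1) (some (p.1 + 3))).any (fun cl =>
          PySem.Chars.isIn ['X'] cl && !PySem.Chars.isIn "Extended".toList cl
            && decide (PySem.Chars.len cl < 50))
      else false) = true) ↔ pvSpec lines 0 := by
  rw [List.any_eq_true]
  constructor
  · rintro ⟨p, hp, hfp⟩
    rw [PySem.List.mem_enumerate_iff] at hp
    obtain ⟨k, hk, rfl⟩ := hp
    simp only [zero_add] at hfp
    split at hfp
    · rename_i hno
      rw [List.any_eq_true] at hfp
      obtain ⟨cl, hcl, hhit⟩ := hfp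
      rw [show ((k : Int) + 3) = ((k : Int) + ((3 : Nat) : Int)) from by norm_num,
        PySem.List.slice_natCast_add] at hcl
      rw [List.mem_iff_getElem] at hcl
      obtain ⟨m, hm, rfl⟩ := hcl
      simp only [List.getElem_take, List.getElem_drop] at hhit ⊢
      have hmlen : m < 3 ∧ k + m < lines.length := by
        simp [List.length_take, List.length_drop] at hm; omega
      refine ⟨k + m, hmlen.2, ?_, Or.inr ⟨k, by omega, by omega, ?_⟩⟩
      · rw [List.getD_eq_getElem _ _ hmlen.2]; simpa [pvHit] using hhit
      · rw [List.getD_eq_getElem _ _ hk]; simpa [pvNo] using hno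
    · exact absurd hfp (by simp)
  · rintro ⟨j, hj, hhit, hcond⟩
    rcases hcond with h | ⟨i, hij, hji, hno⟩
    · omega
    have hi : i < lines.length := by omega
    refine ⟨((i : Int), lines[i]), ?_, ?_⟩
    · rw [PySem.List.mem_enumerate_iff]; exact ⟨i, hi, by simp⟩
    · simp only
      have hno' : PySem.Chars.isIn "Not Observed".toList lines[i] = true := by
        rw [List.getD_eq_getElem _ _ hi] at hno
        simpa [pvNo] using hno
      rw [if_pos hno']
      rw [show ((i : Int) + 3) = ((i : Int) + ((3 : Nat) : Int)) from by norm_num,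
        PySem.List.slice_natCast_add, List.any_eq_true]
      refine ⟨lines[j], ?_, ?_⟩
      · rw [List.mem_iff_getElem]
        refine ⟨j - i, ?_, ?_⟩
        · simp [List.length_take, List.length_drop]; omega
        · simp only [List.getElem_take, List.getElem_drop]
          congr 1; omega
      · rw [List.getD_eq_getElem _ _ hj] at hhit; simpa [pvHit] using hhit

-- ===== VERDICT (by name: the statement is the Claim_ definition above) =====
theorem check_not_observed_spec : Claim_equal_check_not_observed := by
  intro img text _
  unfold Spec_check_not_observed check_not_observed check_not_observed_alt
  set lines := PySem.Chars.splitOn text.toList "\n".toList with hlines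
  by_cases hg : PySem.Chars.isIn "Not Observed".toList text.toList = true
  · rw [if_pos hg, Bool.eq_iff_iff]
    rw [pv_a_inner_iff, pv_alt_loop_iff lines 0 (by omega)]
  · rw [if_neg hg]
    have hB : pvAltLoop lines 0 = false := by
      rw [Bool.eq_false_iff]
      intro hT
      rw [pv_alt_loop_iff lines 0 (by omega)] at hT
      obtain ⟨j, hj, _, hcond⟩ := hT
      rcases hcond with h | ⟨i, hij, _, hno⟩
      · omega
      have hi : i < lines.length := by omega
      rw [List.getD_eq_getElem _ _ hi] at hno
      have hinf : lines[i] <:+: text.toList :=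
        pv_splitOn_piece_infix text.toList "\n".toList lines[i] (List.getElem_mem hi)
      have : "Not Observed".toList <:+: text.toList :=
        ((PySem.Chars.isIn_iff_infix _ _).mp (by simpa [pvNo] using hno)).trans hinf
      exact hg ((PySem.Chars.isIn_iff_infix _ _).mpr this)
    exact hB.symm
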